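-- pv_equiv track=rewrite | github.com/pholland08/python-assignments | hw8/assignment/main.py | ex_8_15
-- ===== SOURCE A (Python) =====
-- def ex_8_15(words: list) -> str:
-- 	"""
-- 	8.15 Write a function that returns the most popular ending letter for words. Your program will take a list of
-- 		words, count the ending letter of each word and return the letter whose count is the largest.
-- 	"""
-- 	endings: dict = {}
--
-- 	for word in words:
-- 		ending = word[-1]
--
-- 		if endings.get(ending) is None:
-- 			endings[ending] = 0
--
-- 		endings[ending] = endings[ending] + 1
--
-- 	items = list(endings.items())
-- 	items.sort(key=lambda x: x[1], reverse=True)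
--
-- 	return items[0][0]
-- ===== SOURCE B (Python) =====
-- def ex_8_15(words: list) -> str:
--     ends = [w[-1] for w in words]
--     return max(dict.fromkeys(ends), key=ends.count)
-- ===== Notes on version B (the rewrite author's own statement) =====
-- stated objective: simpler
-- what changed: Drops the incremental count table and the sort entirely: B builds the list of ending letters, dedups it in first-appearance order (dict.fromkeys) and returns the candidate letter with the largest ends.count via one max scan - candidates-with-brute-force-count instead of histogram-then-stable-reverse-sort; the tie-break (first ending letter to appear) is preserved because max returns the first maximal candidate.
import Mathlib
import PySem

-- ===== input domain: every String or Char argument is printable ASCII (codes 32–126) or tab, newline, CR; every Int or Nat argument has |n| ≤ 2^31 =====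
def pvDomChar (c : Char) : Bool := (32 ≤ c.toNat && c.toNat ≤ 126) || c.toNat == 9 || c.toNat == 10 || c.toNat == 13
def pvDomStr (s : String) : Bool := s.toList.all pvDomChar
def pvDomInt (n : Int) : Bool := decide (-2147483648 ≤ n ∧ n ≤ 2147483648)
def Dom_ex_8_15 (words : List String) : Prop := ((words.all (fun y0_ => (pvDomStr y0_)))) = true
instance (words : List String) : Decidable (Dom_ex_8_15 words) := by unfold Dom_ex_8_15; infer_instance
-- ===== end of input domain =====

-- B drops A's incremental count table and sort: it lists the ending letters, dedups them
-- in first-appearance order and takes the candidate maximising ends.count (simpler).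

-- ===== PORT A =====
def ex_8_15 (words : List String) : String :=
  let endings := words.foldl (fun d w =>
    let ending := (PySem.Str.pyGet? w (-1)).getD default   -- word[-1]; none (empty word) excluded by Pre_
    let d1 := if (d.get? ending).isNone then d.insert ending (0 : Int) else d
    d1.insert ending (d1.getD ending 0 + 1)) PySem.Dict.empty
  let items := PySem.List.sorted endings.items (fun x => x.2) true
  match PySem.List.pyGet? items 0 with
  | some p => String.singleton p.1
  | none => ""              -- items[0] IndexError (empty input); excluded by Pre_

-- ===== PORT B =====
def ex_8_15_alt (words : List String) : String :=
  let ends := words.map (fun w => (PySem.Str.pyGet? w (-1)).getD default)  -- [w[-1] for w in words]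
  match PySem.List.max? (PySem.List.dedup ends) (fun c => (List.count c ends : Int)) with
  | some c => String.singleton c  -- max(dict.fromkeys(ends), key=ends.count)
  | none => ""              -- max() ValueError (empty input); excluded by Pre_

-- ===== PRECONDITION & SPEC =====
-- Pre_ excludes exactly the inputs where A raises: the empty list (IndexError at items[0])
-- and any empty word (IndexError at word[-1]).
def Pre_ex_8_15 (words : List String) : Prop :=
  words ≠ [] ∧ ∀ w ∈ words, w.toList ≠ []
instance (words : List String) : Decidable (Pre_ex_8_15 words) := by unfold Pre_ex_8_15; infer_instance

def pvWitness_ex_8_15 : List String := ["cat", "dog", "pig"]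

def Spec_ex_8_15 (words : List String) (out : String) : Prop := out = ex_8_15_alt words
instance (words : List String) (out : String) : Decidable (Spec_ex_8_15 words out) := by unfold Spec_ex_8_15; infer_instance

-- ===== CLAIM (what is proved, stated in full; the proofs are below) =====
def Claim_equal_ex_8_15 : Prop := ∀ (words : List String), Dom_ex_8_15 words → Pre_ex_8_15 words → Spec_ex_8_15 words (ex_8_15 words)

-- ===== LEMMAS AND PROOFS =====

-- A's count-loop body (check-None / initialise to 0 / add 1) is a single counting insert.
lemma stepA_eq_counting_insert (d : PySem.Dict Char Int) (c : Char) :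
    (let d1 := if (d.get? c).isNone then d.insert c (0 : Int) else d
     d1.insert c (d1.getD c 0 + 1)) = d.insert c (d.getD c 0 + 1) := by
  cases h : d.get? c with
  | none =>
      simp only [Option.isNone_none, if_pos]
      rw [PySem.Dict.getD_insert_self, PySem.Dict.insert_insert_self,
          PySem.Dict.getD_of_get?_eq_none d 0 h]
  | some v => simp

-- A's counting fold over words is Counter(ends).
lemma foldA_eq_counter (words : List String) :
    words.foldl (fun d w =>
      let ending := (PySem.Str.pyGet? w (-1)).getD default
      let d1 := if (d.get? ending).isNone then d.insert ending (0 : Int) else d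
      d1.insert ending (d1.getD ending 0 + 1)) PySem.Dict.empty
    = PySem.Dict.counter (words.map (fun w => (PySem.Str.pyGet? w (-1)).getD default)) := by
  rw [← PySem.Dict.foldl_insert_getD_add_one_eq_counter, List.foldl_map]
  have hfun : (fun (d : PySem.Dict Char Int) (w : String) =>
      let ending := (PySem.Str.pyGet? w (-1)).getD default
      let d1 := if (d.get? ending).isNone then d.insert ending (0 : Int) else d
      d1.insert ending (d1.getD ending 0 + 1))
    = (fun (d : PySem.Dict Char Int) (w : String) =>
      d.insert ((PySem.Str.pyGet? w (-1)).getD default)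
        (d.getD ((PySem.Str.pyGet? w (-1)).getD default) 0 + 1)) := by
    funext d w
    exact stepA_eq_counting_insert d _
  rw [hfun]

-- the head of a stable reverse sort by key is the FIRST key-maximal element, i.e. max? with that key
lemma head_foldl_insertBy {α : Type} (key : α → Int) (l : List α) (acc : List α) :
    (l.foldl (fun a x => PySem.List.insertBy (fun a b => decide (key b < key a)) x a) acc).head?
    = l.foldl (fun m x =>
        match m with
        | none => some x
        | some m => if key m < key x then some x else some m) acc.head? := by
  induction l generalizing acc with
  | nil => rfl
  | cons x t ih =>
      rw [List.foldl_cons, List.foldl_cons, ih]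
      congr 1
      cases acc with
      | nil => rfl
      | cons h rest =>
          simp only [PySem.List.insertBy, List.head?_cons]
          by_cases hk : key h < key x <;> simp [hk]

lemma head_sorted_rev_eq_max? {α : Type} (key : α → Int) (l : List α) :
    (PySem.List.sorted l key true).head? = PySem.List.max? l key := by
  simp only [PySem.List.sorted, PySem.List.max?, if_pos]
  exact head_foldl_insertBy key l []

-- the max? scan commutes with mapping the elements (composed key)
lemma foldl_maxscan_map {α β : Type} (f : α → β) (key : β → Int) (l : List α) (m : Option α) :
    (l.map f).foldl (fun acc x =>
      match acc with
      | none => some x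
      | some m => if key m < key x then some x else some m) (m.map f)
    = (l.foldl (fun acc x =>
      match acc with
      | none => some x
      | some m => if key (f m) < key (f x) then some x else some m) m).map f := by
  induction l generalizing m with
  | nil => rfl
  | cons x t ih =>
      cases m with
      | none => simpa using ih (some x)
      | some a =>
          simp only [List.map_cons, List.foldl_cons, Option.map_some]
          by_cases hk : key (f a) < key (f x)
          · rw [if_pos hk, if_pos hk]
            simpa using ih (some x)
          · rw [if_neg hk, if_neg hk]
            simpa using ih (some a)

lemma max?_map {α β : Type} (f : α → β) (key : β → Int) (l : List α) :
    PySem.List.max? (l.map f) key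
      = (PySem.List.max? l (fun x => key (f x))).map f := by
  simpa [PySem.List.max?] using foldl_maxscan_map f key l none

-- ===== VERDICT (by name: the statement is the Claim_ definition above) =====
theorem ex_8_15_spec : Claim_equal_ex_8_15 := by
  intro words _ hpre
  unfold Spec_ex_8_15 ex_8_15 ex_8_15_alt
  rw [foldA_eq_counter]
  simp only []
  rw [PySem.Dict.items_counter]
  set ends := words.map (fun w => (PySem.Str.pyGet? w (-1)).getD default) with hends
  have hne : ends ≠ [] := by
    simp only [hends, ne_eq, List.map_eq_nil_iff]
    exact hpre.1
  have hmax := head_sorted_rev_eq_max? (fun p : Char × Int => p.2)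
      ((PySem.Set.ofList ends).map (fun k => (k, (List.count k ends : Int))))
  rw [max?_map (fun k => (k, (List.count k ends : Int))) (fun p => p.2)] at hmax
  have hM : ∃ m, PySem.List.max? (PySem.Set.ofList ends)
      (fun k => (List.count k ends : Int)) = some m := by
    cases h : PySem.List.max? (PySem.Set.ofList ends) (fun k => (List.count k ends : Int)) with
    | none =>
        exfalso
        have := (PySem.List.max?_eq_none_iff _ _).mp h
        obtain ⟨x, t, hx⟩ := List.exists_cons_of_ne_nil hne
        have hxmem : x ∈ PySem.Set.ofList ends := (PySem.Set.mem_ofList ends x).mpr (by rw [hx]; exact List.mem_cons_self)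
        rw [this] at hxmem
        exact absurd hxmem List.not_mem_nil
    | some m => exact ⟨m, rfl⟩
  obtain ⟨m, hm⟩ := hM
  rw [hm] at hmax
  cases hs : PySem.List.sorted ((PySem.Set.ofList ends).map (fun k => (k, (List.count k ends : Int))))
      (fun x => x.2) true with
  | nil =>
      exfalso
      have := (PySem.List.sorted_eq_nil_iff _ _ _).mp hs
      simp only [List.map_eq_nil_iff] at this
      obtain ⟨x, t, hx⟩ := List.exists_cons_of_ne_nil hne
      have hxmem : x ∈ PySem.Set.ofList ends := (PySem.Set.mem_ofList ends x).mpr (by rw [hx]; exact List.mem_cons_self)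
      rw [this] at hxmem
      exact absurd hxmem List.not_mem_nil
  | cons p rest =>
      rw [hs, List.head?_cons] at hmax
      have hp : p = (m, (List.count m ends : Int)) := by
        injection hmax.symm with h
        exact h.symm
      have hdedup : PySem.List.dedup ends = PySem.Set.ofList ends := rfl
      rw [hdedup, hm, hp]
      simp [PySem.List.pyGet?, PySem.List.pyIdx?]
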